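-- pv_equiv track=rewrite | github.com/westeroddlewseen/stashpoint | stashpoint/diff.py | diff_stashes
-- ===== SOURCE A (Python) =====
-- from typing import Dict, Tuple, List
--
-- def diff_stashes(
--     stash_a: Dict[str, str],
--     stash_b: Dict[str, str]
-- ) -> Dict[str, Tuple[str, str]]:
--     """
--     Compare two stashes and return differences.
--
--     Returns a dict of key -> (value_in_a, value_in_b) for all differing keys.
--     Missing values are represented as None.
--     """
--     all_keys = set(stash_a.keys()) | set(stash_b.keys())
--     diffs = {}
--     for key in sorted(all_keys):
--         val_a = stash_a.get(key)
--         val_b = stash_b.get(key)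
--         if val_a != val_b:
--             diffs[key] = (val_a, val_b)
--     return diffs
-- ===== SOURCE B (Python) =====
-- def diff_stashes(stash_a, stash_b):
--     """Two-pointer merge of the two key-sorted item lists, emitting each
--     difference in key order as the merge advances (no key-union set, no
--     filter-then-sort)."""
--     items_a = sorted(stash_a.items(), key=lambda p: p[0])
--     items_b = sorted(stash_b.items(), key=lambda p: p[0])
--     diffs = []
--     i = j = 0
--     while i < len(items_a) and j < len(items_b):
--         (ka, va), (kb, vb) = items_a[i], items_b[j]
--         if ka < kb:
--             diffs.append((ka, (va, None)))
--             i += 1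
--         elif kb < ka:
--             diffs.append((kb, (None, vb)))
--             j += 1
--         else:
--             if va != vb:
--                 diffs.append((ka, (va, vb)))
--             i += 1
--             j += 1
--     diffs.extend((k, (v, None)) for k, v in items_a[i:])
--     diffs.extend((k, (None, v)) for k, v in items_b[j:])
--     return dict(diffs)
-- ===== Notes on version B (the rewrite author's own statement) =====
-- stated objective: alternative
-- what changed: A builds the key union as a set, sorts every key and filters while building the dict; B never forms a key union: it sorts each stash's items once and runs a two-pointer merge over the two sorted item lists, emitting each difference in key order as the pointers advance.
import Mathlib
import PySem

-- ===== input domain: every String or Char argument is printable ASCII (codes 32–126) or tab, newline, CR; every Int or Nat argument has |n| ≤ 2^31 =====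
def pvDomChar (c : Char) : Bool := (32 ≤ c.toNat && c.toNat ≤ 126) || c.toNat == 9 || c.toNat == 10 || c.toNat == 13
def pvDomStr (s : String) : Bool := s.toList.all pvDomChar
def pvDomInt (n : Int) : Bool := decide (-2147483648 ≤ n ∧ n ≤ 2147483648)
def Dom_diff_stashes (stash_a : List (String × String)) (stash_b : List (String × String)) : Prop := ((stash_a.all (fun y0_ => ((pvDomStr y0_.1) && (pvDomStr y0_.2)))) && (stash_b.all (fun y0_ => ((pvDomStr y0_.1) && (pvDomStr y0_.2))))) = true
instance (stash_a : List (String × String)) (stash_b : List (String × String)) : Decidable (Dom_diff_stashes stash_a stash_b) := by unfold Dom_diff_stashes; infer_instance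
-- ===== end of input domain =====

-- B replaces A's key-union/sort-everything/filter by a two-pointer merge of the two
-- key-sorted item lists, emitting the differences in key order as the merge advances
-- (alternative algorithm; same return value, no side effects involved).

-- ===== PORT A =====
def diff_stashes (stash_a : List (String × String)) (stash_b : List (String × String)) : List (String × Option String × Option String) :=
  -- all_keys = set(stash_a.keys()) | set(stash_b.keys())
  let all_keys : PySem.Set String :=
    PySem.Set.union (PySem.Set.ofList ((PySem.Dict.mk stash_a).keys))
                    (PySem.Set.ofList ((PySem.Dict.mk stash_b).keys))
  -- diffs = {}; for key in sorted(all_keys): … if val_a != val_b: diffs[key] = (val_a, val_b)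
  let diffs : PySem.Dict String (Option String × Option String) :=
    (PySem.List.sorted all_keys (fun k => k) false).foldl
      (fun diffs key =>
        let val_a := (PySem.Dict.mk stash_a).get? key
        let val_b := (PySem.Dict.mk stash_b).get? key
        if val_a ≠ val_b then diffs.insert key (val_a, val_b) else diffs)
      PySem.Dict.empty
  diffs.items

-- ===== PORT B =====
-- stash_a.items(): the item list of the dict the association list denotes under the
-- first-match convention — the first pair kept for each key (exact for a Python dict,
-- whose item list carries each key once).
def pvDictItemsAux : List String → List (String × String) → List (String × String)
  | _, [] => []
  | seen, p :: rest =>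
    if p.1 ∈ seen then pvDictItemsAux seen rest
    else p :: pvDictItemsAux (p.1 :: seen) rest

def pvDictItems (l : List (String × String)) : List (String × String) :=
  pvDictItemsAux [] l

-- the two-pointer while-loop of Source B: structural recursion on the two sorted item lists,
-- the two trailing extends are the [], l and l, [] clauses
def pvMerge : List (String × String) → List (String × String) → List (String × Option String × Option String)
  | [], bs => bs.map (fun p => (p.1, none, some p.2))
  | as, [] => as.map (fun p => (p.1, some p.2, none))
  | (ka, va) :: as, (kb, vb) :: bs =>
    if ka < kb then (ka, some va, none) :: pvMerge as ((kb, vb) :: bs)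
    else if kb < ka then (kb, none, some vb) :: pvMerge ((ka, va) :: as) bs
    else if va ≠ vb then (ka, some va, some vb) :: pvMerge as bs
    else pvMerge as bs
termination_by as bs => as.length + bs.length

def diff_stashes_alt (stash_a : List (String × String)) (stash_b : List (String × String)) : List (String × Option String × Option String) :=
  -- items_a = sorted(stash_a.items(), key=…); items_b likewise; merge; return dict(diffs)
  (PySem.Dict.ofList
    (pvMerge (PySem.List.sorted (pvDictItems stash_a) (fun p => p.1) false)
             (PySem.List.sorted (pvDictItems stash_b) (fun p => p.1) false))).items

-- ===== PRECONDITION & SPEC =====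
def Spec_diff_stashes (stash_a : List (String × String)) (stash_b : List (String × String)) (out : List (String × Option String × Option String)) : Prop := out = diff_stashes_alt stash_a stash_b
instance (stash_a : List (String × String)) (stash_b : List (String × String)) (out : List (String × Option String × Option String)) : Decidable (Spec_diff_stashes stash_a stash_b out) := by unfold Spec_diff_stashes; infer_instance

-- ===== CLAIM (what is proved, stated in full; the proofs are below) =====
def Claim_equal_diff_stashes : Prop := ∀ (stash_a : List (String × String)) (stash_b : List (String × String)), Dom_diff_stashes stash_a stash_b → Spec_diff_stashes stash_a stash_b (diff_stashes stash_a stash_b)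

-- ===== LEMMAS AND PROOFS =====

-- ---- A side: the loop over the sorted key union is the sorted filterMap ----

-- A's loop over fresh, distinct keys: conditional dict-insert is a filterMap on items.
theorem items_foldl_condInsert {κ ν : Type} [BEq κ] [LawfulBEq κ]
    (c : κ → Prop) [DecidablePred c] (g : κ → ν)
    (ks : List κ) (d : PySem.Dict κ ν)
    (hfresh : ∀ k ∈ ks, d.contains k = false) (hnd : ks.Nodup) :
    (ks.foldl (fun d k => if c k then d.insert k (g k) else d) d).items
      = d.items ++ ks.filterMap (fun k => if c k then some (k, g k) else none) := by
  induction ks generalizing d with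
  | nil => simp
  | cons k t ih =>
    simp only [List.foldl_cons, List.filterMap_cons]
    rcases List.nodup_cons.mp hnd with ⟨hkt, hndt⟩
    by_cases hc : c k
    · simp only [if_pos hc]
      rw [ih (d.insert k (g k))
            (fun k' hk' => by
              rw [PySem.Dict.contains_insert]
              have : (k' == k) = false := by
                simp only [beq_eq_false_iff_ne]
                exact fun h => hkt (h ▸ hk')
              simp [this, hfresh k' (List.mem_cons_of_mem _ hk')]) hndt]
      rw [PySem.Dict.items_insert_of_not_contains d (g k) (hfresh k (List.mem_cons_self))]
      simp
    · simp only [if_neg hc]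
      exact ih d (fun k' hk' => hfresh k' (List.mem_cons_of_mem _ hk')) hndt

-- a key-preserving filterMap keeps strict order on the keys
theorem pairwise_fst_filterMap {ν : Type}
    (c : String → Prop) [DecidablePred c] (g : String → ν) (l : List String)
    (h : l.Pairwise (· < ·)) :
    (l.filterMap (fun k => if c k then some (k, g k) else none)).Pairwise
      (fun p q => p.1 < q.1) := by
  induction l with
  | nil => simp
  | cons k t ih =>
    rcases List.pairwise_cons.mp h with ⟨hk, ht⟩
    simp only [List.filterMap_cons]
    by_cases hc : c k
    · simp only [if_pos hc]
      refine List.pairwise_cons.mpr ⟨?_, ih ht⟩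
      intro p hp
      rcases List.mem_filterMap.mp hp with ⟨x, hx, hfx⟩
      by_cases hcx : c x
      · simp only [if_pos hcx, Option.some_inj] at hfx
        subst hfx; exact hk x hx
      · simp [if_neg hcx] at hfx
    · simp only [if_neg hc]
      exact ih ht

theorem diff_stashes_A_sorted
    (c : String → Prop) [DecidablePred c] (g : String → Option String × Option String)
    (U : List String) (hUnd : U.Nodup) :
    ((PySem.List.sorted U (fun k => k) false).foldl
        (fun d k => if c k then d.insert k (g k) else d) PySem.Dict.empty).items
      = PySem.List.sorted
          (U.filterMap (fun k => if c k then some (k, g k) else none)) (fun p => p.1) false := by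
  have hSnd : (PySem.List.sorted U (fun k => k) false).Nodup :=
    ((PySem.List.sorted_perm U (fun k => k) false).nodup_iff).mpr hUnd
  have hSlt : (PySem.List.sorted U (fun k => k) false).Pairwise (· < ·) := by
    have hle := PySem.List.sorted_pairwise U (fun k => k)
    exact (hle.and hSnd).imp (fun h => lt_of_le_of_ne h.1 h.2)
  rw [items_foldl_condInsert c g _ PySem.Dict.empty
      (fun k _ => PySem.Dict.contains_empty k) hSnd]
  rw [show (PySem.Dict.empty : PySem.Dict String (Option String × Option String)).items = [] from rfl,
      List.nil_append]
  exact (PySem.List.sorted_eq_of_perm_of_pairwise_lt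
    (U.filterMap (fun k => if c k then some (k, g k) else none))
    ((PySem.List.sorted U (fun k => k) false).filterMap
      (fun k => if c k then some (k, g k) else none))
    (fun p : String × Option String × Option String => p.1)
    ((PySem.List.sorted_perm U (fun k => k) false).filterMap _)
    (pairwise_fst_filterMap c g _ hSlt)).symm

-- ---- pvDictItems: same key set, distinct keys, same first-match lookup ----

theorem mem_keys_pvDictItemsAux (l : List (String × String)) (seen : List String) (k : String) :
    k ∈ (pvDictItemsAux seen l).map Prod.fst ↔ k ∈ l.map Prod.fst ∧ k ∉ seen := by
  induction l generalizing seen with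
  | nil => simp [pvDictItemsAux]
  | cons p rest ih =>
    simp only [pvDictItemsAux, List.map_cons, List.mem_cons]
    by_cases hp : p.1 ∈ seen
    · rw [if_pos hp, ih]
      constructor
      · rintro ⟨h, hs⟩; exact ⟨Or.inr h, hs⟩
      · rintro ⟨h | h, hs⟩
        · exact absurd (h ▸ hp) hs
        · exact ⟨h, hs⟩
    · rw [if_neg hp]
      simp only [List.map_cons, List.mem_cons, ih, List.mem_cons]
      constructor
      · rintro (h | ⟨h, hs⟩)
        · exact ⟨Or.inl h, h ▸ hp⟩
        · exact ⟨Or.inr h, fun hk => hs (Or.inr hk)⟩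
      · rintro ⟨h | h, hs⟩
        · exact Or.inl h
        · by_cases hk : k = p.1
          · exact Or.inl hk
          · exact Or.inr ⟨h, fun hk' => hs (hk'.resolve_left hk)⟩

theorem nodup_keys_pvDictItemsAux (l : List (String × String)) (seen : List String) :
    ((pvDictItemsAux seen l).map Prod.fst).Nodup := by
  induction l generalizing seen with
  | nil => simp [pvDictItemsAux]
  | cons p rest ih =>
    simp only [pvDictItemsAux]
    by_cases hp : p.1 ∈ seen
    · rw [if_pos hp]; exact ih seen
    · rw [if_neg hp]
      simp only [List.map_cons, List.nodup_cons]
      refine ⟨fun h => ?_, ih _⟩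
      exact ((mem_keys_pvDictItemsAux rest (p.1 :: seen) p.1).mp h).2 (List.mem_cons_self)

theorem mem_keys_pvDictItems (l : List (String × String)) (k : String) :
    k ∈ (pvDictItems l).map Prod.fst ↔ k ∈ l.map Prod.fst := by
  rw [pvDictItems, mem_keys_pvDictItemsAux]
  simp

theorem nodup_keys_pvDictItems (l : List (String × String)) :
    ((pvDictItems l).map Prod.fst).Nodup :=
  nodup_keys_pvDictItemsAux l []

theorem get?_mk_pvDictItemsAux (l : List (String × String)) (seen : List String) (k : String)
    (hk : k ∉ seen) :
    (PySem.Dict.mk (pvDictItemsAux seen l)).get? k = (PySem.Dict.mk l).get? k := by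
  induction l generalizing seen with
  | nil => rfl
  | cons p rest ih =>
    simp only [pvDictItemsAux]
    by_cases hp : p.1 ∈ seen
    · rw [if_pos hp, ih seen hk, PySem.Dict.get?_mk_cons]
      have : (p.1 == k) = false := beq_eq_false_iff_ne.mpr (fun h => hk (h ▸ hp))
      simp [this]
    · rw [if_neg hp, PySem.Dict.get?_mk_cons, PySem.Dict.get?_mk_cons]
      by_cases hpk : (p.1 == k) = true
      · simp [hpk]
      · simp only [hpk, Bool.false_eq_true, if_false]
        exact ih (p.1 :: seen)
          (fun h => (List.mem_cons.mp h).elim (fun h' => hpk (by simp [h'.symm])) hk)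

theorem get?_mk_pvDictItems (l : List (String × String)) (k : String) :
    (PySem.Dict.mk (pvDictItems l)).get? k = (PySem.Dict.mk l).get? k :=
  get?_mk_pvDictItemsAux l [] k (by simp)

-- first-match lookup is invariant under permutation when keys are distinct
theorem get?_mk_perm (m m' : List (String × String)) (hp : m'.Perm m)
    (h : (m.map Prod.fst).Nodup) (k : String) :
    (PySem.Dict.mk m').get? k = (PySem.Dict.mk m).get? k := by
  have h' : (m'.map Prod.fst).Nodup := ((hp.map Prod.fst).nodup_iff).mpr h
  cases hm : (PySem.Dict.mk m).get? k with
  | some v =>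
    have hmem : (k, v) ∈ m := (PySem.Dict.get?_eq_some_iff_mem_items (PySem.Dict.mk m) k v h).mp hm
    exact (PySem.Dict.get?_eq_some_iff_mem_items (PySem.Dict.mk m') k v h').mpr
      (hp.mem_iff.mpr hmem)
  | none =>
    have hnk : k ∉ (PySem.Dict.mk m).keys :=
      (PySem.Dict.get?_eq_none_iff_not_mem_keys (PySem.Dict.mk m) k).mp hm
    exact (PySem.Dict.get?_eq_none_iff_not_mem_keys (PySem.Dict.mk m') k).mpr
      (fun hk => hnk ((hp.map Prod.fst).mem_iff.mp hk))

-- ---- the merge: every key of the output comes from an input ----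

theorem fst_mem_pvMerge (La Lb : List (String × String))
    (x : String × Option String × Option String) (hx : x ∈ pvMerge La Lb) :
    x.1 ∈ La.map Prod.fst ∨ x.1 ∈ Lb.map Prod.fst := by
  fun_induction pvMerge La Lb with
  | case1 bs =>
    rcases List.mem_map.mp hx with ⟨p, hp, hpx⟩
    exact Or.inr (List.mem_map.mpr ⟨p, hp, by rw [← hpx]⟩)
  | case2 as _ =>
    rcases List.mem_map.mp hx with ⟨p, hp, hpx⟩
    exact Or.inl (List.mem_map.mpr ⟨p, hp, by rw [← hpx]⟩)
  | case3 ka va as kb vb bs hlt ih =>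
    rcases List.mem_cons.mp hx with h | h
    · exact Or.inl (by simp [h])
    · rcases ih h with h' | h'
      · exact Or.inl (by simp only [List.map_cons, List.mem_cons]; exact Or.inr h')
      · exact Or.inr h'
  | case4 ka va as kb vb bs hlt hgt ih =>
    rcases List.mem_cons.mp hx with h | h
    · exact Or.inr (by simp [h])
    · rcases ih h with h' | h'
      · exact Or.inl h'
      · exact Or.inr (by simp only [List.map_cons, List.mem_cons]; exact Or.inr h')
  | case5 ka va as kb vb bs hlt hgt hne ih =>
    rcases List.mem_cons.mp hx with h | h
    · exact Or.inl (by simp [h])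
    · rcases ih h with h' | h'
      · exact Or.inl (by simp only [List.map_cons, List.mem_cons]; exact Or.inr h')
      · exact Or.inr (by simp only [List.map_cons, List.mem_cons]; exact Or.inr h')
  | case6 ka va as kb vb bs hlt hgt hne ih =>
    rcases ih hx with h' | h'
    · exact Or.inl (by simp only [List.map_cons, List.mem_cons]; exact Or.inr h')
    · exact Or.inr (by simp only [List.map_cons, List.mem_cons]; exact Or.inr h')

-- ---- the merge output is strictly increasing on keys ----

theorem pairwise_pvMerge (La Lb : List (String × String))
    (hA : La.Pairwise (fun p q => p.1 < q.1)) (hB : Lb.Pairwise (fun p q => p.1 < q.1)) :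
    (pvMerge La Lb).Pairwise (fun p q => p.1 < q.1) := by
  fun_induction pvMerge La Lb with
  | case1 bs => exact (List.pairwise_map).mpr (hB.imp (fun h => h))
  | case2 as _ => exact (List.pairwise_map).mpr (hA.imp (fun h => h))
  | case3 ka va as kb vb bs hlt ih =>
    rcases List.pairwise_cons.mp hA with ⟨hka, hA'⟩
    refine List.pairwise_cons.mpr ⟨?_, ih hA' hB⟩
    intro y hy
    rcases fst_mem_pvMerge _ _ y hy with h | h
    · rcases List.mem_map.mp h with ⟨q, hq, hqy⟩
      exact hqy ▸ hka q hq
    · rcases List.mem_map.mp h with ⟨q, hq, hqy⟩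
      rcases List.mem_cons.mp hq with rfl | hq'
      · exact hqy ▸ hlt
      · rcases List.pairwise_cons.mp hB with ⟨hkb, _⟩
        exact hqy ▸ lt_trans hlt (hkb q hq')
  | case4 ka va as kb vb bs hlt hgt ih =>
    rcases List.pairwise_cons.mp hB with ⟨hkb, hB'⟩
    refine List.pairwise_cons.mpr ⟨?_, ih hA hB'⟩
    intro y hy
    rcases fst_mem_pvMerge _ _ y hy with h | h
    · rcases List.mem_map.mp h with ⟨q, hq, hqy⟩
      rcases List.mem_cons.mp hq with rfl | hq'
      · exact hqy ▸ hgt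
      · rcases List.pairwise_cons.mp hA with ⟨hka, _⟩
        exact hqy ▸ lt_trans hgt (hka q hq')
    · rcases List.mem_map.mp h with ⟨q, hq, hqy⟩
      exact hqy ▸ hkb q hq
  | case5 ka va as kb vb bs hlt hgt hne ih =>
    rcases List.pairwise_cons.mp hA with ⟨hka, hA'⟩
    rcases List.pairwise_cons.mp hB with ⟨hkb, hB'⟩
    refine List.pairwise_cons.mpr ⟨?_, ih hA' hB'⟩
    intro y hy
    rcases fst_mem_pvMerge _ _ y hy with h | h
    · rcases List.mem_map.mp h with ⟨q, hq, hqy⟩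
      exact hqy ▸ hka q hq
    · rcases List.mem_map.mp h with ⟨q, hq, hqy⟩
      have hk : ka = kb := le_antisymm (not_lt.mp hgt) (not_lt.mp hlt)
      exact hqy ▸ hk ▸ hkb q hq
  | case6 ka va as kb vb bs hlt hgt hne ih =>
    exact ih (List.pairwise_cons.mp hA).2 (List.pairwise_cons.mp hB).2

-- ---- membership in the merge output ----

theorem get?_mk_none_of_lt (L : List (String × String)) (k0 : String)
    (h : ∀ q ∈ L, k0 < q.1) : (PySem.Dict.mk L).get? k0 = none := by
  refine (PySem.Dict.get?_eq_none_iff_not_mem_keys _ _).mpr (fun hk => ?_)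
  rcases List.mem_map.mp hk with ⟨q, hq, hqk⟩
  exact lt_irrefl k0 (hqk ▸ h q hq)

theorem nodup_keys_of_pairwise_lt (L : List (String × String))
    (h : L.Pairwise (fun p q => p.1 < q.1)) : (L.map Prod.fst).Nodup :=
  (List.pairwise_map).mpr (h.imp (fun hlt => ne_of_lt hlt))

theorem get?_mk_cons_self (p : String × String) (as : List (String × String)) :
    (PySem.Dict.mk (p :: as)).get? p.1 = some p.2 := by
  rw [PySem.Dict.get?_mk_cons]; simp

theorem get?_mk_cons_ne (p : String × String) (as : List (String × String)) (k : String)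
    (h : k ≠ p.1) : (PySem.Dict.mk (p :: as)).get? k = (PySem.Dict.mk as).get? k := by
  rw [PySem.Dict.get?_mk_cons]
  have : (p.1 == k) = false := beq_eq_false_iff_ne.mpr (fun hh => h hh.symm)
  simp [this]

theorem get?_mk_nil (k : String) :
    (PySem.Dict.mk ([] : List (String × String))).get? k = none := rfl

theorem mem_pvMerge (La Lb : List (String × String))
    (hA : La.Pairwise (fun p q => p.1 < q.1)) (hB : Lb.Pairwise (fun p q => p.1 < q.1))
    (x : String × Option String × Option String) :
    x ∈ pvMerge La Lb ↔ ∃ k, (k ∈ La.map Prod.fst ∨ k ∈ Lb.map Prod.fst)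
      ∧ (PySem.Dict.mk La).get? k ≠ (PySem.Dict.mk Lb).get? k
      ∧ x = (k, (PySem.Dict.mk La).get? k, (PySem.Dict.mk Lb).get? k) := by
  fun_induction pvMerge La Lb with
  | case1 bs =>
    have hnd : (bs.map Prod.fst).Nodup := nodup_keys_of_pairwise_lt bs hB
    constructor
    · intro hx
      rcases List.mem_map.mp hx with ⟨p, hp, rfl⟩
      have hg : (PySem.Dict.mk bs).get? p.1 = some p.2 :=
        (PySem.Dict.get?_eq_some_iff_mem_items (PySem.Dict.mk bs) p.1 p.2 hnd).mpr hp
      exact ⟨p.1, Or.inr (List.mem_map.mpr ⟨p, hp, rfl⟩),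
        by rw [get?_mk_nil, hg]; simp,
        by rw [get?_mk_nil, hg]⟩
    · rintro ⟨k, hk, hne, rfl⟩
      rcases hk with hk | hk
      · simp at hk
      · rw [get?_mk_nil] at hne ⊢
        cases hv : (PySem.Dict.mk bs).get? k with
        | none => exact absurd hv.symm hne
        | some v =>
          have hmem : (k, v) ∈ bs :=
            (PySem.Dict.get?_eq_some_iff_mem_items (PySem.Dict.mk bs) k v hnd).mp hv
          exact List.mem_map.mpr ⟨(k, v), hmem, rfl⟩
  | case2 as h =>
    have hnd : (as.map Prod.fst).Nodup := nodup_keys_of_pairwise_lt as hA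
    constructor
    · intro hx
      rcases List.mem_map.mp hx with ⟨p, hp, rfl⟩
      have hg : (PySem.Dict.mk as).get? p.1 = some p.2 :=
        (PySem.Dict.get?_eq_some_iff_mem_items (PySem.Dict.mk as) p.1 p.2 hnd).mpr hp
      exact ⟨p.1, Or.inl (List.mem_map.mpr ⟨p, hp, rfl⟩),
        by rw [get?_mk_nil, hg]; simp,
        by rw [get?_mk_nil, hg]⟩
    · rintro ⟨k, hk, hne, rfl⟩
      rcases hk with hk | hk
      · rw [get?_mk_nil] at hne ⊢
        cases hv : (PySem.Dict.mk as).get? k with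
        | none => exact absurd hv hne
        | some v =>
          have hmem : (k, v) ∈ as :=
            (PySem.Dict.get?_eq_some_iff_mem_items (PySem.Dict.mk as) k v hnd).mp hv
          exact List.mem_map.mpr ⟨(k, v), hmem, rfl⟩
      · simp at hk
  | case3 ka va as kb vb bs hlt ih =>
    rcases List.pairwise_cons.mp hA with ⟨hka, hA'⟩
    rcases List.pairwise_cons.mp hB with ⟨hkb, _⟩
    have hbnone : (PySem.Dict.mk ((kb, vb) :: bs)).get? ka = none :=
      get?_mk_none_of_lt _ ka (by
        intro q hq
        rcases List.mem_cons.mp hq with rfl | hq'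
        · exact hlt
        · exact lt_trans hlt (hkb q hq'))
    have ihx := ih hA' hB
    constructor
    · intro hx
      rcases List.mem_cons.mp hx with rfl | hx'
      · refine ⟨ka, Or.inl (by simp), ?_, ?_⟩
        · rw [get?_mk_cons_self (ka, va) as, hbnone]
          simp
        · rw [get?_mk_cons_self (ka, va) as, hbnone]
      · obtain ⟨k, hk, hne, rfl⟩ := ihx.mp hx'
        have hkka : k ≠ ka := by
          rintro rfl
          rcases hk with h | h
          · rcases List.mem_map.mp h with ⟨q, hq, hqk⟩
            exact lt_irrefl k (hqk ▸ hka q hq)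
          · exact ((PySem.Dict.get?_eq_none_iff_not_mem_keys
              (PySem.Dict.mk ((kb, vb) :: bs)) k).mp hbnone) h
        refine ⟨k, ?_, ?_, ?_⟩
        · rcases hk with h | h
          · exact Or.inl (by simp only [List.map_cons, List.mem_cons]; exact Or.inr h)
          · exact Or.inr h
        · rw [get?_mk_cons_ne (ka, va) as k hkka]; exact hne
        · rw [get?_mk_cons_ne (ka, va) as k hkka]
    · rintro ⟨k, hk, hne, rfl⟩
      by_cases hkka : k = ka
      · subst hkka
        rw [get?_mk_cons_self (k, va) as, hbnone]
        exact List.mem_cons_self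
      · rw [get?_mk_cons_ne (ka, va) as k hkka] at hne ihx ⊢
        refine List.mem_cons_of_mem _ (ihx.mpr ⟨k, ?_, hne, rfl⟩)
        rcases hk with h | h
        · rw [List.map_cons] at h
          rcases List.mem_cons.mp h with h' | h'
          · exact absurd h' hkka
          · exact Or.inl h'
        · exact Or.inr h
  | case4 ka va as kb vb bs hlt hgt ih =>
    have hkab : kb < ka := hgt
    rcases List.pairwise_cons.mp hA with ⟨hka, _⟩
    rcases List.pairwise_cons.mp hB with ⟨hkb, hB'⟩
    have hanone : (PySem.Dict.mk ((ka, va) :: as)).get? kb = none :=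
      get?_mk_none_of_lt _ kb (by
        intro q hq
        rcases List.mem_cons.mp hq with rfl | hq'
        · exact hkab
        · exact lt_trans hkab (hka q hq'))
    have ihx := ih hA hB'
    constructor
    · intro hx
      rcases List.mem_cons.mp hx with rfl | hx'
      · refine ⟨kb, Or.inr (by simp), ?_, ?_⟩
        · rw [get?_mk_cons_self (kb, vb) bs, hanone]
          simp
        · rw [get?_mk_cons_self (kb, vb) bs, hanone]
      · obtain ⟨k, hk, hne, rfl⟩ := ihx.mp hx'
        have hkkb : k ≠ kb := by
          rintro rfl
          rcases hk with h | h
          · exact ((PySem.Dict.get?_eq_none_iff_not_mem_keys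
              (PySem.Dict.mk ((ka, va) :: as)) k).mp hanone) h
          · rcases List.mem_map.mp h with ⟨q, hq, hqk⟩
            exact lt_irrefl k (hqk ▸ hkb q hq)
        refine ⟨k, ?_, ?_, ?_⟩
        · rcases hk with h | h
          · exact Or.inl h
          · exact Or.inr (by simp only [List.map_cons, List.mem_cons]; exact Or.inr h)
        · rw [get?_mk_cons_ne (kb, vb) bs k hkkb]; exact hne
        · rw [get?_mk_cons_ne (kb, vb) bs k hkkb]
    · rintro ⟨k, hk, hne, rfl⟩
      by_cases hkkb : k = kb
      · subst hkkb
        rw [get?_mk_cons_self (k, vb) bs, hanone]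
        exact List.mem_cons_self
      · rw [get?_mk_cons_ne (kb, vb) bs k hkkb] at hne ihx ⊢
        refine List.mem_cons_of_mem _ (ihx.mpr ⟨k, ?_, hne, rfl⟩)
        rcases hk with h | h
        · exact Or.inl h
        · rw [List.map_cons] at h
          rcases List.mem_cons.mp h with h' | h'
          · exact absurd h' hkkb
          · exact Or.inr h'
  | case5 ka va as kb vb bs hlt hgt hne0 ih =>
    have hk : ka = kb := le_antisymm (not_lt.mp hgt) (not_lt.mp hlt)
    subst hk
    rcases List.pairwise_cons.mp hA with ⟨hka, hA'⟩
    rcases List.pairwise_cons.mp hB with ⟨hkb, hB'⟩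
    have ihx := ih hA' hB'
    constructor
    · intro hx
      rcases List.mem_cons.mp hx with rfl | hx'
      · refine ⟨ka, Or.inl (by simp), ?_, ?_⟩
        · rw [get?_mk_cons_self (ka, va) as, get?_mk_cons_self (ka, vb) bs]
          simp [hne0]
        · rw [get?_mk_cons_self (ka, va) as, get?_mk_cons_self (ka, vb) bs]
      · obtain ⟨k, hkm, hne, rfl⟩ := ihx.mp hx'
        have hkka : k ≠ ka := by
          rintro rfl
          rcases hkm with h | h
          · rcases List.mem_map.mp h with ⟨q, hq, hqk⟩
            exact lt_irrefl k (hqk ▸ hka q hq)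
          · rcases List.mem_map.mp h with ⟨q, hq, hqk⟩
            exact lt_irrefl k (hqk ▸ hkb q hq)
        refine ⟨k, ?_, ?_, ?_⟩
        · rcases hkm with h | h
          · exact Or.inl (by simp only [List.map_cons, List.mem_cons]; exact Or.inr h)
          · exact Or.inr (by simp only [List.map_cons, List.mem_cons]; exact Or.inr h)
        · rw [get?_mk_cons_ne (ka, va) as k hkka, get?_mk_cons_ne (ka, vb) bs k hkka]
          exact hne
        · rw [get?_mk_cons_ne (ka, va) as k hkka, get?_mk_cons_ne (ka, vb) bs k hkka]
    · rintro ⟨k, hkm, hne, rfl⟩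
      by_cases hkka : k = ka
      · subst hkka
        rw [get?_mk_cons_self (k, va) as, get?_mk_cons_self (k, vb) bs]
        exact List.mem_cons_self
      · rw [get?_mk_cons_ne (ka, va) as k hkka, get?_mk_cons_ne (ka, vb) bs k hkka] at hne ihx ⊢
        refine List.mem_cons_of_mem _ (ihx.mpr ⟨k, ?_, hne, rfl⟩)
        rcases hkm with h | h
        · rw [List.map_cons] at h
          rcases List.mem_cons.mp h with h' | h'
          · exact absurd h' hkka
          · exact Or.inl h'
        · rw [List.map_cons] at h
          rcases List.mem_cons.mp h with h' | h'
          · exact absurd h' hkka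
          · exact Or.inr h'
  | case6 ka va as kb vb bs hlt hgt hne0 ih =>
    have hkeq : ka = kb := le_antisymm (not_lt.mp hgt) (not_lt.mp hlt)
    subst hkeq
    have hveq : va = vb := not_not.mp hne0
    subst hveq
    rcases List.pairwise_cons.mp hA with ⟨hka, hA'⟩
    rcases List.pairwise_cons.mp hB with ⟨hkb, hB'⟩
    have ihx := ih hA' hB'
    constructor
    · intro hx
      obtain ⟨k, hkm, hne, rfl⟩ := ihx.mp hx
      have hkka : k ≠ ka := by
        rintro rfl
        rcases hkm with h | h
        · rcases List.mem_map.mp h with ⟨q, hq, hqk⟩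
          exact lt_irrefl k (hqk ▸ hka q hq)
        · rcases List.mem_map.mp h with ⟨q, hq, hqk⟩
          exact lt_irrefl k (hqk ▸ hkb q hq)
      refine ⟨k, ?_, ?_, ?_⟩
      · rcases hkm with h | h
        · exact Or.inl (by simp only [List.map_cons, List.mem_cons]; exact Or.inr h)
        · exact Or.inr (by simp only [List.map_cons, List.mem_cons]; exact Or.inr h)
      · rw [get?_mk_cons_ne (ka, va) as k hkka, get?_mk_cons_ne (ka, va) bs k hkka]
        exact hne
      · rw [get?_mk_cons_ne (ka, va) as k hkka, get?_mk_cons_ne (ka, va) bs k hkka]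
    · rintro ⟨k, hkm, hne, rfl⟩
      by_cases hkka : k = ka
      · subst hkka
        rw [get?_mk_cons_self (k, va) as, get?_mk_cons_self (k, va) bs] at hne
        exact absurd rfl hne
      · rw [get?_mk_cons_ne (ka, va) as k hkka, get?_mk_cons_ne (ka, va) bs k hkka] at hne ihx ⊢
        refine ihx.mpr ⟨k, ?_, hne, rfl⟩
        rcases hkm with h | h
        · rw [List.map_cons] at h
          rcases List.mem_cons.mp h with h' | h'
          · exact absurd h' hkka
          · exact Or.inl h'
        · rw [List.map_cons] at h
          rcases List.mem_cons.mp h with h' | h'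
          · exact absurd h' hkka
          · exact Or.inr h'

-- ---- assembly: B's merge is the sorted difference list ----

theorem diff_stashes_B_sorted (sa sb : List (String × String)) :
    PySem.List.sorted
      ((PySem.Set.union (PySem.Set.ofList ((PySem.Dict.mk sa).keys))
          (PySem.Set.ofList ((PySem.Dict.mk sb).keys))).filterMap
        (fun k => if ((PySem.Dict.mk sa).get? k ≠ (PySem.Dict.mk sb).get? k)
                  then some (k, ((PySem.Dict.mk sa).get? k, (PySem.Dict.mk sb).get? k))
                  else none))
      (fun p => p.1) false
    = diff_stashes_alt sa sb := by
  have hpermA : (PySem.List.sorted (pvDictItems sa) (fun p => p.1) false).Perm (pvDictItems sa) :=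
    PySem.List.sorted_perm _ _ _
  have hpermB : (PySem.List.sorted (pvDictItems sb) (fun p => p.1) false).Perm (pvDictItems sb) :=
    PySem.List.sorted_perm _ _ _
  have hndLa : ((PySem.List.sorted (pvDictItems sa) (fun p => p.1) false).map Prod.fst).Nodup :=
    ((hpermA.map Prod.fst).nodup_iff).mpr (nodup_keys_pvDictItems sa)
  have hndLb : ((PySem.List.sorted (pvDictItems sb) (fun p => p.1) false).map Prod.fst).Nodup :=
    ((hpermB.map Prod.fst).nodup_iff).mpr (nodup_keys_pvDictItems sb)
  have hPa : (PySem.List.sorted (pvDictItems sa) (fun p => p.1) false).Pairwise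
      (fun p q => p.1 < q.1) := by
    have hle := PySem.List.sorted_pairwise (pvDictItems sa) (fun p => p.1)
    exact (hle.and ((List.pairwise_map).mp hndLa)).imp (fun h => lt_of_le_of_ne h.1 h.2)
  have hPb : (PySem.List.sorted (pvDictItems sb) (fun p => p.1) false).Pairwise
      (fun p q => p.1 < q.1) := by
    have hle := PySem.List.sorted_pairwise (pvDictItems sb) (fun p => p.1)
    exact (hle.and ((List.pairwise_map).mp hndLb)).imp (fun h => lt_of_le_of_ne h.1 h.2)
  have hga : ∀ k, (PySem.Dict.mk (PySem.List.sorted (pvDictItems sa) (fun p => p.1) false)).get? k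
      = (PySem.Dict.mk sa).get? k :=
    fun k => (get?_mk_perm (pvDictItems sa) _ hpermA (nodup_keys_pvDictItems sa) k).trans
      (get?_mk_pvDictItems sa k)
  have hgb : ∀ k, (PySem.Dict.mk (PySem.List.sorted (pvDictItems sb) (fun p => p.1) false)).get? k
      = (PySem.Dict.mk sb).get? k :=
    fun k => (get?_mk_perm (pvDictItems sb) _ hpermB (nodup_keys_pvDictItems sb) k).trans
      (get?_mk_pvDictItems sb k)
  have hkeysA : ∀ k, k ∈ (PySem.List.sorted (pvDictItems sa) (fun p => p.1) false).map Prod.fst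
      ↔ k ∈ sa.map Prod.fst :=
    fun k => ((hpermA.map Prod.fst).mem_iff).trans (mem_keys_pvDictItems sa k)
  have hkeysB : ∀ k, k ∈ (PySem.List.sorted (pvDictItems sb) (fun p => p.1) false).map Prod.fst
      ↔ k ∈ sb.map Prod.fst :=
    fun k => ((hpermB.map Prod.fst).mem_iff).trans (mem_keys_pvDictItems sb k)
  have hMpair := pairwise_pvMerge _ _ hPa hPb
  have hMnd : (pvMerge (PySem.List.sorted (pvDictItems sa) (fun p => p.1) false)
      (PySem.List.sorted (pvDictItems sb) (fun p => p.1) false)).Nodup :=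
    hMpair.imp (fun h heq => absurd (heq ▸ h) (lt_irrefl _))
  have hWnd : ((PySem.Set.union (PySem.Set.ofList ((PySem.Dict.mk sa).keys))
      (PySem.Set.ofList ((PySem.Dict.mk sb).keys))).filterMap
        (fun k => if ((PySem.Dict.mk sa).get? k ≠ (PySem.Dict.mk sb).get? k)
                  then some (k, ((PySem.Dict.mk sa).get? k, (PySem.Dict.mk sb).get? k))
                  else none)).Nodup := by
    refine List.Nodup.filterMap ?_ (PySem.Set.nodup_union _ _ (PySem.Set.nodup_ofList _))
    intro a a' b hb hb'
    by_cases ha : (PySem.Dict.mk sa).get? a ≠ (PySem.Dict.mk sb).get? a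
    · rw [if_pos ha] at hb
      by_cases ha' : (PySem.Dict.mk sa).get? a' ≠ (PySem.Dict.mk sb).get? a'
      · rw [if_pos ha'] at hb'
        have h1 : (a, ((PySem.Dict.mk sa).get? a, (PySem.Dict.mk sb).get? a)) = b := by
          simpa using hb
        have h2 : (a', ((PySem.Dict.mk sa).get? a', (PySem.Dict.mk sb).get? a')) = b := by
          simpa using hb'
        have h3 := h1.trans h2.symm
        exact congrArg Prod.fst h3
      · rw [if_neg ha'] at hb'; simp at hb'
    · rw [if_neg ha] at hb; simp at hb
  have hMem : ∀ x, x ∈ pvMerge (PySem.List.sorted (pvDictItems sa) (fun p => p.1) false)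
      (PySem.List.sorted (pvDictItems sb) (fun p => p.1) false)
      ↔ x ∈ (PySem.Set.union (PySem.Set.ofList ((PySem.Dict.mk sa).keys))
          (PySem.Set.ofList ((PySem.Dict.mk sb).keys))).filterMap
            (fun k => if ((PySem.Dict.mk sa).get? k ≠ (PySem.Dict.mk sb).get? k)
                      then some (k, ((PySem.Dict.mk sa).get? k, (PySem.Dict.mk sb).get? k))
                      else none) := by
    intro x
    rw [mem_pvMerge _ _ hPa hPb, List.mem_filterMap]
    constructor
    · rintro ⟨k, hk, hne, rfl⟩
      refine ⟨k, ?_, ?_⟩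
      · rw [PySem.Set.mem_union, PySem.Set.mem_ofList, PySem.Set.mem_ofList]
        rcases hk with h | h
        · exact Or.inl ((hkeysA k).mp h)
        · exact Or.inr ((hkeysB k).mp h)
      · rw [hga k, hgb k] at hne
        rw [if_pos hne, hga k, hgb k]
    · rintro ⟨k, hk, hx⟩
      by_cases hne : (PySem.Dict.mk sa).get? k ≠ (PySem.Dict.mk sb).get? k
      · rw [if_pos hne] at hx
        refine ⟨k, ?_, ?_, ?_⟩
        · rw [PySem.Set.mem_union, PySem.Set.mem_ofList, PySem.Set.mem_ofList] at hk
          rcases hk with h | h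
          · exact Or.inl ((hkeysA k).mpr h)
          · exact Or.inr ((hkeysB k).mpr h)
        · rw [hga k, hgb k]; exact hne
        · rw [hga k, hgb k]; exact (Option.some_inj.mp hx).symm
      · rw [if_neg hne] at hx; simp at hx
  have hperm : (pvMerge (PySem.List.sorted (pvDictItems sa) (fun p => p.1) false)
      (PySem.List.sorted (pvDictItems sb) (fun p => p.1) false)).Perm _ :=
    (List.perm_ext_iff_of_nodup hMnd hWnd).mpr hMem
  have hMkeysnd : ((pvMerge (PySem.List.sorted (pvDictItems sa) (fun p => p.1) false)
      (PySem.List.sorted (pvDictItems sb) (fun p => p.1) false)).map Prod.fst).Nodup :=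
    (List.pairwise_map).mpr (hMpair.imp (fun h => ne_of_lt h))
  have hitems : (PySem.Dict.ofList (pvMerge
      (PySem.List.sorted (pvDictItems sa) (fun p => p.1) false)
      (PySem.List.sorted (pvDictItems sb) (fun p => p.1) false))).items
      = pvMerge (PySem.List.sorted (pvDictItems sa) (fun p => p.1) false)
          (PySem.List.sorted (pvDictItems sb) (fun p => p.1) false) := by
    have := PySem.Dict.items_foldl_insert_fresh
      (d := (PySem.Dict.empty : PySem.Dict String (Option String × Option String)))
      (l := pvMerge (PySem.List.sorted (pvDictItems sa) (fun p => p.1) false)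
        (PySem.List.sorted (pvDictItems sb) (fun p => p.1) false))
      (k := Prod.fst) (v := Prod.snd) (fun a _ => rfl) hMkeysnd
    simpa [PySem.Dict.ofList, PySem.Dict.update] using this
  rw [diff_stashes_alt, hitems]
  exact PySem.List.sorted_eq_of_perm_of_pairwise_lt _ _ (fun p => p.1) hperm hMpair

-- ===== VERDICT (by name: the statement is the Claim_ definition above) =====
theorem diff_stashes_spec : Claim_equal_diff_stashes := by
  intro sa sb _
  unfold Spec_diff_stashes
  rw [← diff_stashes_B_sorted sa sb]
  simp only [diff_stashes]
  exact diff_stashes_A_sorted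
    (fun k => (PySem.Dict.mk sa).get? k ≠ (PySem.Dict.mk sb).get? k)
    (fun k => ((PySem.Dict.mk sa).get? k, (PySem.Dict.mk sb).get? k))
    _ (PySem.Set.nodup_union _ _ (PySem.Set.nodup_ofList _))
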